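-- pv_equiv track=rewrite | github.com/hoxfor/guide-de-survie-sciences-informatiques | BAC1/LINFO1101 - Introduction à la programmation/Session 07/Création de dictionnaire des valeurs maximums.py | create_dict_max
-- ===== SOURCE A (Python) =====
-- def create_dict_max(lst):
--     d = {}
--     for x, y in lst:
--         if x in d:
--             if y > d[x]:
--                 d[x] = y
--         else:
--             d[x] = y
--     return d
-- ===== SOURCE B (Python) =====
-- def create_dict_max(lst):
--     groups = {}
--     for x, y in lst:
--         groups.setdefault(x, []).append(y)
--     return {k: max(v) for k, v in groups.items()}
-- ===== Notes on version B (the rewrite author's own statement) =====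
-- stated objective: alternative
-- what changed: B replaces the incremental running-max update with two phases: first group all values per key into lists (setdefault/append, first-appearance order), then reduce each group with max in a dict comprehension.
import Mathlib
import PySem

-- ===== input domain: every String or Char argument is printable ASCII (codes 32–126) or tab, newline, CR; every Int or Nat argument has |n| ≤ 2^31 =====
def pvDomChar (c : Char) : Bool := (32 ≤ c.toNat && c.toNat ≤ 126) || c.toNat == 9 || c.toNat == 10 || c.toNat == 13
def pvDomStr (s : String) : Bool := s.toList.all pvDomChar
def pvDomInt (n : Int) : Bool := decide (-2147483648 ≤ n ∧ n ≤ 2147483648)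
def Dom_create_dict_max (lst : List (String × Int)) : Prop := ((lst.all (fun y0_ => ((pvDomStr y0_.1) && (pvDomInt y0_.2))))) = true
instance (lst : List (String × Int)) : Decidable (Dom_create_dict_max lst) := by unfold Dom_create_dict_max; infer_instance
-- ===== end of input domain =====

-- B groups all values per key first, then reduces each group with max (alternative decomposition, same cost).

-- ===== PORT A =====
-- d[x] is read only under 'x in d', so the default 0 of getD is never used.
def create_dict_max (lst : List (String × Int)) : List (String × Int) :=
  (lst.foldl (fun d (p : String × Int) =>
      if d.contains p.1 then
        if p.2 > d.getD p.1 0 then d.insert p.1 p.2 else d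
      else d.insert p.1 p.2)
    (PySem.Dict.empty : PySem.Dict String Int)).items

-- ===== PORT B =====
-- max(v): Python raises on []; every group list is nonempty, so the default 0 is never read.
def pymaxInt (vs : List Int) : Int := (PySem.List.max? vs (fun y => y)).getD 0

def create_dict_max_alt (lst : List (String × Int)) : List (String × Int) :=
  let groups : PySem.Dict String (List Int) :=
    lst.foldl (fun g (p : String × Int) => g.insert p.1 (g.getD p.1 [] ++ [p.2]))
      PySem.Dict.empty
  groups.items.map (fun kv => (kv.1, pymaxInt kv.2))

-- ===== PRECONDITION & SPEC =====
def Spec_create_dict_max (lst : List (String × Int)) (out : List (String × Int)) : Prop := out = create_dict_max_alt lst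
instance (lst : List (String × Int)) (out : List (String × Int)) : Decidable (Spec_create_dict_max lst out) := by unfold Spec_create_dict_max; infer_instance

-- ===== CLAIM (what is proved, stated in full; the proofs are below) =====
def Claim_equal_create_dict_max : Prop := ∀ (lst : List (String × Int)), Dom_create_dict_max lst → Spec_create_dict_max lst (create_dict_max lst)

-- ===== LEMMAS AND PROOFS =====

-- max over a nonempty list extended on the right
lemma pymaxInt_append_singleton (v : Int) (vs : List Int) (h : vs ≠ []) :
    pymaxInt (vs ++ [v]) = max (pymaxInt vs) v := by
  cases vs with
  | nil => exact absurd rfl h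
  | cons a t =>
      simp only [pymaxInt, List.cons_append, PySem.List.max?_id_cons, Option.getD_some]
      simp [List.foldl_append]

-- loop invariant: A's dict is B's groups dict with each group reduced by max
lemma loop_inv (lst : List (String × Int)) (d : PySem.Dict String Int)
    (g : PySem.Dict String (List Int))
    (hnd : g.keys.Nodup)
    (hne : ∀ p ∈ g.items, p.2 ≠ ([] : List Int))
    (hrel : d.items = g.items.map (fun kv => (kv.1, pymaxInt kv.2))) :
    (lst.foldl (fun d (p : String × Int) =>
        if d.contains p.1 then
          if p.2 > d.getD p.1 0 then d.insert p.1 p.2 else d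
        else d.insert p.1 p.2) d).items
      = (lst.foldl (fun g (p : String × Int) => g.insert p.1 (g.getD p.1 [] ++ [p.2])) g).items.map
          (fun kv => (kv.1, pymaxInt kv.2)) := by
  induction lst generalizing d g with
  | nil => simpa using hrel
  | cons p rest ih =>
      obtain ⟨x, y⟩ := p
      simp only [List.foldl_cons]
      have hkeys : d.keys = g.keys := by
        show d.items.map Prod.fst = g.items.map Prod.fst
        rw [hrel, List.map_map]; rfl
      have hcont : d.contains x = g.contains x := by
        rw [PySem.Dict.contains_eq_decide_mem_keys, PySem.Dict.contains_eq_decide_mem_keys, hkeys]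
      by_cases hc : g.contains x = true
      · -- existing key
        obtain ⟨vs, hmem⟩ : ∃ vs, (x, vs) ∈ g.items := by
          rw [PySem.Dict.contains_iff_mem_keys] at hc
          simp only [PySem.Dict.keys, List.mem_map] at hc
          obtain ⟨q, hq, hqx⟩ := hc
          exact ⟨q.2, by rwa [← hqx, Prod.mk.eta]⟩
        have hvs : g.getD x [] = vs := PySem.Dict.getD_of_mem_items g hmem hnd []
        have hvne : vs ≠ [] := hne _ hmem
        have hd : d.getD x 0 = pymaxInt vs := by
          have : (x, pymaxInt vs) ∈ d.items := by
            rw [hrel]; exact List.mem_map.2 ⟨(x, vs), hmem, rfl⟩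
          exact PySem.Dict.getD_of_mem_items d this (by rw [show d.keys = g.keys from hkeys]; exact hnd) 0
        have hig : (g.insert x (g.getD x [] ++ [y])).items
            = g.items.map (fun q => if q.1 == x then (x, g.getD x [] ++ [y]) else q) :=
          PySem.Dict.items_insert_of_contains g _ hc
        have hmax : pymaxInt (vs ++ [y]) = max (pymaxInt vs) y :=
          pymaxInt_append_singleton y vs hvne
        -- common facts for the recursive call on the new states
        have hnd' : (g.insert x (g.getD x [] ++ [y])).keys.Nodup := PySem.Dict.nodup_keys_insert _ _ _ hnd
        have hne' : ∀ p ∈ (g.insert x (g.getD x [] ++ [y])).items, p.2 ≠ ([] : List Int) := by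
          intro q hq
          rcases (PySem.Dict.mem_items_insert _ _ _ _).1 hq with h | ⟨h, _⟩
          · subst h; simp [hvs]
          · exact hne _ h
        rw [hcont]
        simp only [hc, if_true, hd]
        by_cases hy : y > pymaxInt vs
        · simp only [hy, if_true]
          apply ih _ _ hnd' hne'
          rw [hig, PySem.Dict.items_insert_of_contains d _ (by rw [hcont]; exact hc), hrel,
              List.map_map, List.map_map]
          apply List.map_congr_left
          intro q hq
          by_cases hx : q.1 = x
          · simp only [Function.comp]
            simp [hx, hvs, hmax]
            omega
          · simp [hx]
        · simp only [hy, if_false]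
          apply ih _ _ hnd' hne'
          rw [hig, hrel, List.map_map]
          apply List.map_congr_left
          intro q hq
          by_cases hx : q.1 = x
          · have hq2 : q.2 = vs := by
              have h1 : g.getD q.1 [] = q.2 :=
                PySem.Dict.getD_of_mem_items g (by simpa using hq) hnd []
              rw [hx, hvs] at h1
              exact h1.symm
            simp only [Function.comp]
            simp [hx, hvs, hq2, hmax]
            omega
          · simp [hx]
      · -- new key
        have hc' : g.contains x = false := by simpa using hc
        rw [hcont]
        simp only [hc', if_false, Bool.false_eq_true]
        apply ih
        · exact PySem.Dict.nodup_keys_insert _ _ _ hnd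
        · intro q hq
          rcases (PySem.Dict.mem_items_insert _ _ _ _).1 hq with h | ⟨h, _⟩
          · subst h; simp
          · exact hne _ h
        · rw [PySem.Dict.items_insert_of_not_contains g _ hc',
              PySem.Dict.items_insert_of_not_contains d _ (by rw [hcont]; exact hc'), hrel,
              PySem.Dict.getD_of_not_contains g [] hc']
          simp [pymaxInt, PySem.List.max?_id_cons]

-- ===== VERDICT (by name: the statement is the Claim_ definition above) =====
theorem create_dict_max_spec : Claim_equal_create_dict_max := by
  intro lst _
  show create_dict_max lst = create_dict_max_alt lst
  unfold create_dict_max create_dict_max_alt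
  exact loop_inv lst _ _ (by simp [PySem.Dict.keys, PySem.Dict.empty]) (by simp [PySem.Dict.empty]) (by simp [PySem.Dict.empty])
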